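-- pv_equiv track=rewrite | github.com/HeYuJie2019/bestway | src/ws2812_blink_spi.py | build_block_pattern
-- ===== SOURCE A (Python) =====
-- from typing import Iterable, List, Sequence, Tuple
--
-- Pixel = Tuple[int, int, int]  # (R, G, B)
--
-- def build_block_pattern(
--     count: int,
--     color_a: Pixel,
--     color_b: Pixel,
--     block_size: int = 8,
--     phase: int = 0,
-- ) -> List[Pixel]:
--     """生成按块交替颜色的像素数组。
--
--     参数：
--     - count: LED 数量
--     - color_a, color_b: 两种交替颜色
--     - block_size: 每多少个 LED 为一组
--     - phase: 0 表示以 color_a 开始，1 表示以 color_b 开始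
--     """
--     bs = max(1, int(block_size))
--     out: List[Pixel] = []
--     toggle = phase & 1
--     i = 0
--     while i < count:
--         color = color_b if toggle else color_a
--         run = min(bs, count - i)
--         out.extend([color] * run)
--         i += run
--         toggle ^= 1
--     return out
-- ===== SOURCE B (Python) =====
-- def build_block_pattern(count, color_a, color_b, block_size=8, phase=0):
--     bs = max(1, int(block_size))
--     return [color_b if (phase + i // bs) % 2 else color_a for i in range(count)]
-- ===== Notes on version B (the rewrite author's own statement) =====
-- stated objective: simpler
-- what changed: Replaced the run-extending while-loop with mutable toggle/index state by a stateless per-pixel comprehension that derives each pixel's color from its block number: (phase + i // bs) % 2.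
import Mathlib
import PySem

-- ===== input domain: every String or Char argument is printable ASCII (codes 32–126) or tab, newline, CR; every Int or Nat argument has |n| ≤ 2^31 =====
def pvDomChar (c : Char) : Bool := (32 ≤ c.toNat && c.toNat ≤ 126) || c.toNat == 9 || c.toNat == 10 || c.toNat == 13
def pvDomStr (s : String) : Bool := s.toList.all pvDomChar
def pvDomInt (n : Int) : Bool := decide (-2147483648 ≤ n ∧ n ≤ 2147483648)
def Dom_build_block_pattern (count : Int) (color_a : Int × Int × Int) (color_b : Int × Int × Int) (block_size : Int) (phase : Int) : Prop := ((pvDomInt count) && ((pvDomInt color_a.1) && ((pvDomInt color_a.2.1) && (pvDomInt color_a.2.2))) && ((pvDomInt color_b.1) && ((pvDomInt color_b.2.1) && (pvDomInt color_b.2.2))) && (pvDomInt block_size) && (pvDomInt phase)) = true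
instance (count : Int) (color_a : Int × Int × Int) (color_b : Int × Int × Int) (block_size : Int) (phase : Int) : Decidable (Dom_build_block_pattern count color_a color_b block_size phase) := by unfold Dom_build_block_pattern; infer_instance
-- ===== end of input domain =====

-- B replaces A's per-block run-extending loop with a mutable toggle by a stateless per-pixel
-- comprehension that derives each pixel's color from its block number (phase + i // bs) % 2 (simpler).

-- ===== PORT A =====
-- A's while-loop: state (i, toggle, out); each round appends a run of min(bs, count-i) pixels
-- and flips the toggle. `hbs : 1 ≤ bs` records Python's `bs = max(1, int(block_size))` (needed
-- only for termination; it is a proof argument, not an algorithm change).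
def bbpLoopA (count : Int) (color_a color_b : Int × Int × Int) (bs : Int) (hbs : 1 ≤ bs)
    (i toggle : Int) (out : List (Int × Int × Int)) : List (Int × Int × Int) :=
  if i < count then
    let color := if toggle ≠ 0 then color_b else color_a
    let run := min bs (count - i)
    bbpLoopA count color_a color_b bs hbs (i + run) (PySem.Int.bxor toggle 1)
      (out ++ List.replicate run.toNat color)
  else out
termination_by (count - i).toNat
decreasing_by
  have h1 : 1 ≤ min bs (count - i) := by omega
  omega

def build_block_pattern (count : Int) (color_a : Int × Int × Int) (color_b : Int × Int × Int) (block_size : Int) (phase : Int) : List (Int × Int × Int) :=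
  bbpLoopA count color_a color_b (max 1 block_size) (le_max_left 1 block_size)
    0 (PySem.Int.band phase 1) []

-- ===== PORT B =====
def build_block_pattern_alt (count : Int) (color_a : Int × Int × Int) (color_b : Int × Int × Int) (block_size : Int) (phase : Int) : List (Int × Int × Int) :=
  let bs := max 1 block_size
  (PySem.List.pyRange 0 count 1).map
    (fun i => if PySem.Int.mod (phase + PySem.Int.floordiv i bs) 2 ≠ 0 then color_b else color_a)

-- ===== PRECONDITION & SPEC =====
def Spec_build_block_pattern (count : Int) (color_a : Int × Int × Int) (color_b : Int × Int × Int) (block_size : Int) (phase : Int) (out : List (Int × Int × Int)) : Prop := out = build_block_pattern_alt count color_a color_b block_size phase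
instance (count : Int) (color_a : Int × Int × Int) (color_b : Int × Int × Int) (block_size : Int) (phase : Int) (out : List (Int × Int × Int)) : Decidable (Spec_build_block_pattern count color_a color_b block_size phase out) := by unfold Spec_build_block_pattern; infer_instance

-- ===== CLAIM (what is proved, stated in full; the proofs are below) =====
def Claim_equal_build_block_pattern : Prop := ∀ (count : Int) (color_a : Int × Int × Int) (color_b : Int × Int × Int) (block_size : Int) (phase : Int), Dom_build_block_pattern count color_a color_b block_size phase → Spec_build_block_pattern count color_a color_b block_size phase (build_block_pattern count color_a color_b block_size phase)

-- ===== LEMMAS AND PROOFS =====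

-- floor division is constant on one block [bs*k, bs*(k+1))
theorem pv_floordiv_const (bs i j : Int) (hbs : 0 < bs) (hi : 0 ≤ i) (hdvd : bs ∣ i)
    (h1 : i ≤ j) (h2 : j < i + bs) :
    PySem.Int.floordiv j bs = PySem.Int.floordiv i bs := by
  obtain ⟨k, hk⟩ := hdvd
  have hk0 : 0 ≤ k := by nlinarith
  have e1 : PySem.Int.floordiv i bs = k := by
    rw [PySem.Int.floordiv_eq_iff_of_pos (by omega)]; constructor <;> nlinarith
  have e2 : PySem.Int.floordiv j bs = k := by
    rw [PySem.Int.floordiv_eq_iff_of_pos (by omega)]; constructor <;> nlinarith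
  rw [e1, e2]

-- mapping a function constant on [i, i+n) over that range gives a replicate
theorem pv_map_const_range (f : Int → Int × Int × Int) (c : Int × Int × Int) :
    ∀ (n : Nat) (i : Int), (∀ j, i ≤ j → j < i + n → f j = c) →
      (PySem.List.pyRange i (i + n) 1).map f = List.replicate n c := by
  intro n
  induction n with
  | zero =>
    intro i _
    rw [show i + ((0:Nat):Int) = i by simp, PySem.List.pyRange_one_eq_nil le_rfl]
    simp
  | succ m ih =>
    intro i hc
    have hlt : i < i + ((m : Nat) + 1 : Nat) := by push_cast; omega
    rw [PySem.List.pyRange_one_cons hlt]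
    have : i + ((m + 1 : Nat) : Int) = (i + 1) + (m : Nat) := by push_cast; ring
    rw [this]
    simp only [List.map_cons, List.replicate_succ]
    rw [hc i le_rfl (by push_cast; omega), ih (i + 1) (fun j h1 h2 => hc j (by omega) (by push_cast at h2 ⊢; omega))]

-- loop invariant: starting at a block boundary i with toggle = (phase + i//bs) % 2,
-- A's loop appends exactly B's per-pixel colors for indices i..count-1
theorem bbpLoopA_eq (color_a color_b : Int × Int × Int) (bs : Int) (hbs : 1 ≤ bs) (phase : Int) :
    ∀ (count i toggle : Int) (out : List (Int × Int × Int)),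
      0 ≤ i → bs ∣ i →
      toggle = PySem.Int.mod (phase + PySem.Int.floordiv i bs) 2 →
      bbpLoopA count color_a color_b bs hbs i toggle out
        = out ++ (PySem.List.pyRange i count 1).map
            (fun j => if PySem.Int.mod (phase + PySem.Int.floordiv j bs) 2 ≠ 0 then color_b else color_a) := by
  intro count i toggle out hi hdvd ht
  rw [bbpLoopA]
  by_cases h : i < count
  · simp only [if_pos h]
    set f : Int → Int × Int × Int :=
      fun j => if PySem.Int.mod (phase + PySem.Int.floordiv j bs) 2 ≠ 0 then color_b else color_a with hf
    set run := min bs (count - i) with hrun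
    have hrun1 : 1 ≤ run := by omega
    have hrunbs : run ≤ bs := by omega
    have hirc : i + run ≤ count := by omega
    have hsplit : PySem.List.pyRange i count 1
        = PySem.List.pyRange i (i + run) 1 ++ PySem.List.pyRange (i + run) count 1 :=
      PySem.List.pyRange_one_append i (i + run) count (by omega) hirc
    have hconst : (PySem.List.pyRange i (i + run) 1).map f
        = List.replicate run.toNat (if toggle ≠ 0 then color_b else color_a) := by
      have hr : i + run = i + (run.toNat : Int) := by omega
      rw [hr]
      apply pv_map_const_range
      intro j h1 h2
      rw [hf]
      have : PySem.Int.floordiv j bs = PySem.Int.floordiv i bs :=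
        pv_floordiv_const bs i j (by omega) hi hdvd h1 (by omega)
      simp only [this, ← ht]
    have htrange : toggle = 0 ∨ toggle = 1 := by
      have h0 : 0 ≤ PySem.Int.mod (phase + PySem.Int.floordiv i bs) 2 :=
        PySem.Int.mod_nonneg _ (by omega)
      have h1 : PySem.Int.mod (phase + PySem.Int.floordiv i bs) 2 < 2 :=
        PySem.Int.mod_lt _ (by omega)
      omega
    by_cases hend : i + run = count
    · -- last (possibly short) block: the next loop test fails immediately
      rw [bbpLoopA]
      simp only [if_neg (by omega : ¬ (i + run < count))]
      rw [hsplit, List.map_append, hconst,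
        show PySem.List.pyRange (i + run) count 1 = [] from by
          rw [hend]; exact PySem.List.pyRange_one_eq_nil le_rfl]
      simp
    · -- full block: recurse at the next block boundary i + bs
      have hrbs : run = bs := by omega
      have hdvd' : bs ∣ i + run := by rw [hrbs]; exact dvd_add hdvd (dvd_refl bs)
      have hfd : PySem.Int.floordiv (i + run) bs = PySem.Int.floordiv i bs + 1 := by
        obtain ⟨k, hk⟩ := hdvd
        have hk0 : 0 ≤ k := by nlinarith
        have e1 : PySem.Int.floordiv i bs = k := by
          rw [PySem.Int.floordiv_eq_iff_of_pos (by omega)]; constructor <;> nlinarith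
        have e2 : PySem.Int.floordiv (i + run) bs = k + 1 := by
          rw [PySem.Int.floordiv_eq_iff_of_pos (by omega)]
          constructor <;> nlinarith
        rw [e1, e2]
      have ht' : PySem.Int.bxor toggle 1
          = PySem.Int.mod (phase + PySem.Int.floordiv (i + run) bs) 2 := by
        rw [hfd]
        rw [PySem.Int.mod_eq_emod_of_pos (by omega)] at ht ⊢
        rcases htrange with h0 | h1
        · rw [h0]; have : PySem.Int.bxor 0 1 = 1 := by decide
          rw [this]; omega
        · rw [h1]; have : PySem.Int.bxor 1 1 = 0 := by decide
          rw [this]; omega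
      rw [bbpLoopA_eq color_a color_b bs hbs phase count (i + run) _ _ (by omega) hdvd' ht']
      rw [hsplit, List.map_append, hconst, List.append_assoc]
  · simp only [if_neg h]
    rw [PySem.List.pyRange_one_eq_nil (by omega), List.map_nil, List.append_nil]
termination_by count i => (count - i).toNat
decreasing_by
  have : 1 ≤ min bs (count - i) := by omega
  omega

-- ===== VERDICT (by name: the statement is the Claim_ definition above) =====
theorem build_block_pattern_spec : Claim_equal_build_block_pattern := by
  intro count color_a color_b block_size phase _
  unfold Spec_build_block_pattern build_block_pattern build_block_pattern_alt
  rw [bbpLoopA_eq color_a color_b (max 1 block_size) (le_max_left 1 block_size) phase count 0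
      (PySem.Int.band phase 1) [] le_rfl ⟨0, by ring⟩ ?_]
  · simp
  · rw [PySem.Int.band_one]
    norm_num [PySem.Int.floordiv]
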